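-- pv_equiv track=rewrite | github.com/maracoca/ubb | Semester 1/Fundamentals of Programming/a10/a4/p9_iterative.py | is_increasing_subset_with_common_digits
-- ===== SOURCE A (Python) =====
-- def has_common_digit(current_number: str, following_number: str) -> bool:
--     digits_current_number = set(current_number)
--     digits_following_number = set(following_number)
--     if digits_current_number.intersection(digits_following_number):
--         return 1
--     else:
--         return 0
--
-- def is_increasing_subset_with_common_digits(subset):
--     if len(subset) >= 2:
--         for i in range(len(subset)):
--             if i < len(subset) - 1 and subset[i] > subset[i + 1]:
--                 return 0
--             if i >= 1:
--                 if has_common_digit(str(subset[i - 1]), str(subset[i])) == 0: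
--                     return 0
--         return 1
--     else:
--         return 0
-- ===== SOURCE B (Python) =====
-- def is_increasing_subset_with_common_digits(subset):
--     if len(subset) < 2:
--         return 0
--     ordered = list(subset) == sorted(subset)
--     digits = all(set(str(a)) & set(str(b)) for a, b in zip(subset, subset[1:]))
--     return 1 if ordered and digits else 0
-- ===== Notes on version B (the rewrite author's own statement) =====
-- stated objective: simpler
-- what changed: Replaces A's single index loop with interleaved early-return checks by two whole-list conditions: a sort-based ordering test (list == sorted(list)) and a zip-based pairwise common-digit test.
import Mathlib
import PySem

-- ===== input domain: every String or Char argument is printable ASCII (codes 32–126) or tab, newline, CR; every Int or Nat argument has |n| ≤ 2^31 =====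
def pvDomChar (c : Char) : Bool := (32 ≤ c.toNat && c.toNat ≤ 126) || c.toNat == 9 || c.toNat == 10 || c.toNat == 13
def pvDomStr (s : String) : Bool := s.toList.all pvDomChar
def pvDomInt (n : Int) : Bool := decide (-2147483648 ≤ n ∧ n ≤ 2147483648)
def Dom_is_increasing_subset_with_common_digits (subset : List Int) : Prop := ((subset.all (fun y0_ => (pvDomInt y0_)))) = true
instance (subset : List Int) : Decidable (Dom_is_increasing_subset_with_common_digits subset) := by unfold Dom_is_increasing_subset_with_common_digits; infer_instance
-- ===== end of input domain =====

-- B replaces A's index loop with a sort-based ordering test plus a zip-based pairwise digit test (simpler decomposition, not faster).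

-- ===== PORT A =====
def has_common_digit (current_number following_number : String) : Int :=
  let digits_current_number := PySem.Set.ofList current_number.toList
  let digits_following_number := PySem.Set.ofList following_number.toList
  if ¬ (PySem.Set.inter digits_current_number digits_following_number).isEmpty then 1 else 0

-- the 'for i in range(len(subset))' loop with its two early returns
def pvLoopA (subset : List Int) (n i : Nat) : Int :=
  if i < n then
    if i < n - 1 && decide (subset.getD i 0 > subset.getD (i+1) 0) then 0
    else if 1 ≤ i && (has_common_digit (PySem.Int.toStr (subset.getD (i-1) 0)) (PySem.Int.toStr (subset.getD i 0)) == 0) then 0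
    else pvLoopA subset n (i+1)
  else 1
termination_by n - i

def is_increasing_subset_with_common_digits (subset : List Int) : Int :=
  if subset.length ≥ 2 then pvLoopA subset subset.length 0 else 0

-- ===== PORT B =====
-- set(str(a)) & set(str(b)) is truthy iff the intersection is nonempty
def pvCommon (a b : Int) : Bool :=
  !(PySem.Set.inter (PySem.Set.ofList (PySem.Int.toStr a).toList)
      (PySem.Set.ofList (PySem.Int.toStr b).toList)).isEmpty

def is_increasing_subset_with_common_digits_alt (subset : List Int) : Int :=
  if subset.length < 2 then 0
  else
    let ordered := subset = PySem.List.sorted subset (fun x => x) false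
    -- subset[1:] on a list is exactly subset.tail
    let digits := (subset.zip subset.tail).all (fun p => pvCommon p.1 p.2)
    if ordered ∧ digits then 1 else 0

-- ===== PRECONDITION & SPEC =====
def Spec_is_increasing_subset_with_common_digits (subset : List Int) (out : Int) : Prop := out = is_increasing_subset_with_common_digits_alt subset
instance (subset : List Int) (out : Int) : Decidable (Spec_is_increasing_subset_with_common_digits subset out) := by unfold Spec_is_increasing_subset_with_common_digits; infer_instance

-- ===== CLAIM (what is proved, stated in full; the proofs are below) =====
def Claim_equal_is_increasing_subset_with_common_digits : Prop := ∀ (subset : List Int), Dom_is_increasing_subset_with_common_digits subset → Spec_is_increasing_subset_with_common_digits subset (is_increasing_subset_with_common_digits subset)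


-- ===== LEMMAS AND PROOFS =====

-- A's two checks at index j, as a proposition (order check only when j+1 < n, digit check only when 1 <= j)
abbrev pvChk (subset : List Int) (n j : Nat) : Prop :=
  (j + 1 < n → subset.getD j 0 ≤ subset.getD (j+1) 0) ∧
  (1 ≤ j → pvCommon (subset.getD (j-1) 0) (subset.getD j 0) = true)

-- A's digit test is the negation of B's
lemma hcd_iff (a b : Int) :
    (has_common_digit (PySem.Int.toStr a) (PySem.Int.toStr b) == 0) = true ↔
      ¬ (pvCommon a b = true) := by
  simp only [has_common_digit, pvCommon]
  split_ifs with h <;> simp_all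

-- the loop returns 1 iff every remaining index passes both checks
lemma pvLoopA_spec (subset : List Int) (n i : Nat) :
    pvLoopA subset n i = if (∀ j, j < n → i ≤ j → pvChk subset n j) then 1 else 0 := by
  by_cases hin : i < n
  · rw [pvLoopA, if_pos hin]
    have hIH := pvLoopA_spec subset n (i+1)
    by_cases hord : i < n - 1 ∧ subset.getD i 0 > subset.getD (i+1) 0
    · rw [if_pos (by simp only [Bool.and_eq_true, decide_eq_true_eq]; exact hord)]
      rw [if_neg]
      intro hall
      exact absurd ((hall i hin le_rfl).1 (by omega)) (not_le.mpr hord.2)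
    · rw [if_neg (by simp only [Bool.and_eq_true, decide_eq_true_eq]; exact hord)]
      by_cases hdig : 1 ≤ i ∧ ¬ (pvCommon (subset.getD (i-1) 0) (subset.getD i 0) = true)
      · rw [if_pos (by simp only [Bool.and_eq_true, decide_eq_true_eq, hcd_iff]; exact hdig)]
        rw [if_neg]
        intro hall
        exact hdig.2 ((hall i hin le_rfl).2 hdig.1)
      · rw [if_neg (by simp only [Bool.and_eq_true, decide_eq_true_eq, hcd_iff]; exact hdig)]
        rw [hIH]
        have hchki : pvChk subset n i := by
          constructor
          · intro h1
            exact not_lt.mp (fun hlt => hord ⟨by omega, hlt⟩)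
          · intro hi1
            by_contra hq
            exact hdig ⟨hi1, hq⟩
        have hiff : (∀ j, j < n → i + 1 ≤ j → pvChk subset n j) ↔
            (∀ j, j < n → i ≤ j → pvChk subset n j) := by
          constructor
          · intro h j hj hij
            by_cases hji : j = i
            · subst hji; exact hchki
            · exact h j hj (by omega)
          · intro h j hj hij
            exact h j hj (by omega)
        exact if_congr hiff rfl rfl
  · rw [pvLoopA, if_neg hin]
    rw [if_pos (show ∀ j, j < n → i ≤ j → pvChk subset n j from
      fun j hj hij => absurd hj (by omega))]
termination_by n - i

-- the ordered test of B, characterised by adjacent comparisons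
lemma ordered_iff (subset : List Int) :
    (subset = PySem.List.sorted subset (fun x => x) false) ↔
      (∀ j, j + 1 < subset.length → subset.getD j 0 ≤ subset.getD (j+1) 0) := by
  constructor
  · intro h j hj
    have hp : subset.Pairwise (· ≤ ·) := by
      have := PySem.List.sorted_pairwise (xs := subset) (key := fun x => x)
      rw [← h] at this
      exact this
    have hc := List.isChain_iff_getElem.mp hp.isChain j hj
    rw [List.getD_eq_getElem _ _ (show j < subset.length by omega),
        List.getD_eq_getElem _ _ hj]
    exact hc
  · intro h
    have hc : List.IsChain (· ≤ ·) subset := by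
      rw [List.isChain_iff_getElem]
      intro j hj
      have := h j hj
      rw [List.getD_eq_getElem _ _ (show j < subset.length by omega),
          List.getD_eq_getElem _ _ hj] at this
      exact this
    exact (PySem.List.sorted_eq_self_of_pairwise subset (fun x => x) hc.pairwise).symm

-- the zip-based digit test of B, characterised by adjacent indices
lemma digits_iff (subset : List Int) :
    ((subset.zip subset.tail).all (fun p => pvCommon p.1 p.2) = true) ↔
      (∀ j, j + 1 < subset.length → pvCommon (subset.getD j 0) (subset.getD (j+1) 0) = true) := by
  rw [List.all_eq_true]
  constructor
  · intro h j hj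
    have hjz : j < (subset.zip subset.tail).length := by
      rw [List.length_zip, List.length_tail]; omega
    have hget : (subset.zip subset.tail)[j] =
        (subset[j]'(by omega), subset[j+1]'hj) := by
      simp [List.getElem_zip, List.getElem_tail]
    have hm := h _ (List.getElem_mem hjz)
    rw [hget] at hm
    rw [List.getD_eq_getElem _ _ (show j < subset.length by omega),
        List.getD_eq_getElem _ _ hj]
    exact hm
  · intro h p hp
    obtain ⟨j, hjz, hpj⟩ := List.mem_iff_getElem.mp hp
    have hj : j + 1 < subset.length := by
      rw [List.length_zip, List.length_tail] at hjz; omega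
    have hget : (subset.zip subset.tail)[j] =
        (subset[j]'(by omega), subset[j+1]'hj) := by
      simp [List.getElem_zip, List.getElem_tail]
    have := h j hj
    rw [List.getD_eq_getElem _ _ (show j < subset.length by omega),
        List.getD_eq_getElem _ _ hj] at this
    rw [← hpj, hget]
    exact this

-- ===== VERDICT (by name: the statement is the Claim_ definition above) =====
theorem is_increasing_subset_with_common_digits_spec : Claim_equal_is_increasing_subset_with_common_digits := by
  intro subset _
  unfold Spec_is_increasing_subset_with_common_digits
  unfold is_increasing_subset_with_common_digits is_increasing_subset_with_common_digits_alt
  by_cases hlen : subset.length ≥ 2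
  · rw [if_pos hlen, if_neg (by omega), pvLoopA_spec]
    have hmain : (∀ j, j < subset.length → 0 ≤ j → pvChk subset subset.length j) ↔
        ((subset = PySem.List.sorted subset (fun x => x) false) ∧
          ((subset.zip subset.tail).all (fun p => pvCommon p.1 p.2)) = true) := by
      rw [ordered_iff, digits_iff]
      constructor
      · intro h
        refine ⟨fun j hj => (h j (by omega) (by omega)).1 hj, fun j hj => ?_⟩
        have := (h (j+1) hj (by omega)).2 (by omega)
        exact this
      · rintro ⟨ho, hd⟩ j hj _
        refine ⟨fun hj1 => ho j hj1, fun hj1 => ?_⟩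
        have := hd (j-1) (by omega)
        have hjj : j - 1 + 1 = j := by omega
        rwa [hjj] at this
    exact if_congr hmain rfl rfl
  · rw [if_neg hlen, if_pos (by omega)]
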